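-- pv_equiv track=rewrite | github.com/ruxi22/Bioinformatics | ex2_lab12.py | scan_genome
-- ===== SOURCE A (Python) =====
-- motif = "AGGTAAAGT"
--
-- L = len(motif)
--
-- bases = ["A", "C", "G", "T"]
--
-- def score_window(window):
--     return sum(1 if w == m else -1 for w, m in zip(window, motif))
--
-- def scan_genome(seq):
--     positions, scores = [], []
--     for i in range(len(seq) - L + 1):
--         window = seq[i:i + L]
--         if any(b not in bases for b in window):
--             continue
--         positions.append(i)
--         scores.append(score_window(window))
--     return positions, scores
-- ===== SOURCE B (Python) =====
-- motif = "AGGTAAAGT"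
--
-- L = len(motif)
--
-- bases = ["A", "C", "G", "T"]
--
-- def scan_genome(seq):
--     n = len(seq)
--     prefix = [0]
--     for c in seq:
--         prefix.append(prefix[-1] + (1 if c in bases else 0))
--     positions = [i for i in range(n - L + 1) if prefix[i + L] - prefix[i] == L]
--     scores = [sum(1 if seq[i + j] == motif[j] else -1 for j in range(L))
--               for i in positions]
--     return positions, scores
-- ===== Notes on version B (the rewrite author's own statement) =====
-- stated objective: faster
-- what changed: Window validity is decided in O(1) per window from a precomputed prefix-sum table of per-character validity (prefix[i+L]-prefix[i]==L), replacing A's per-window membership rescan with any(); positions are collected by a comprehension over the table and scores computed only for valid windows by positional indexing instead of slicing+zip.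
import Mathlib
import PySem

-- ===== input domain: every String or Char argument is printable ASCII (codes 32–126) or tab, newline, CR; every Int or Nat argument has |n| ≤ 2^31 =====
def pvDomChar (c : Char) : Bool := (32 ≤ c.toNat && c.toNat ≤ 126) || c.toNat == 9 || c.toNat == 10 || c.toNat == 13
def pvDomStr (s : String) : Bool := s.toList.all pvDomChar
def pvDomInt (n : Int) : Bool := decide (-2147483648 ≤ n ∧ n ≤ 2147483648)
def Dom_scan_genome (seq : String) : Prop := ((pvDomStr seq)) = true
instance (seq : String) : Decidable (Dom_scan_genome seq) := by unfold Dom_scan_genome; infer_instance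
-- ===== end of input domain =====

-- B replaces A's per-window membership rescan by a prefix-sum table of per-character
-- validity (O(1) validity test per window) and scores only the valid windows (objective: faster).

-- shared module constants (motif, L = 9, bases)
def pvMotif : List Char := ['A', 'G', 'G', 'T', 'A', 'A', 'A', 'G', 'T']
def pvBases : List Char := ['A', 'C', 'G', 'T']

-- ===== PORT A =====
def score_window (window : List Char) : Int :=
  ((window.zip pvMotif).map (fun wm => if wm.1 == wm.2 then (1 : Int) else -1)).sum

def scan_genome (seq : String) : List Int × List Int :=
  let cs := seq.toList
  (PySem.List.pyRange 0 ((cs.length : Int) - 9 + 1)).foldl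
    (fun acc i =>
      let window := PySem.List.slice cs (some i) (some (i + 9))
      if window.any (fun b => !(pvBases.contains b)) then acc
      else (acc.1 ++ [i], acc.2 ++ [score_window window]))
    ([], [])

-- ===== PORT B =====
def scan_genome_alt (seq : String) : List Int × List Int :=
  let cs := seq.toList
  let n := cs.length
  let pre := cs.foldl
    (fun p c => p ++ [p.getLast?.getD 0 + (if pvBases.contains c then (1 : Int) else 0)])
    [(0 : Int)]
  let positions := (PySem.List.pyRange 0 ((n : Int) - 9 + 1)).filter
    (fun i => PySem.List.pyGetD pre (i + 9) 0 - PySem.List.pyGetD pre i 0 == 9)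
  let scores := positions.map (fun i =>
    ((PySem.List.pyRange 0 9).map (fun j =>
        if PySem.List.pyGetD cs (i + j) ' ' == PySem.List.pyGetD pvMotif j ' '
        then (1 : Int) else -1)).sum)
  (positions, scores)

-- ===== PRECONDITION & SPEC =====
def Spec_scan_genome (seq : String) (out : List Int × List Int) : Prop := out = scan_genome_alt seq
instance (seq : String) (out : List Int × List Int) : Decidable (Spec_scan_genome seq out) := by unfold Spec_scan_genome; infer_instance

-- ===== CLAIM (what is proved, stated in full; the proofs are below) =====
def Claim_equal_scan_genome : Prop := ∀ (seq : String), Dom_scan_genome seq → Spec_scan_genome seq (scan_genome seq)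

-- ===== LEMMAS AND PROOFS =====

-- per-character validity value, and the prefix-scan B's loop builds
def pvV (c : Char) : Int := if pvBases.contains c then 1 else 0

def pvScan (s : Int) : List Char → List Int
  | [] => []
  | c :: cs => (s + pvV c) :: pvScan (s + pvV c) cs

theorem pvFoldPre (cs : List Char) (acc : List Int) (s : Int) (h : acc.getLast? = some s) :
    cs.foldl (fun p c => p ++ [p.getLast?.getD 0 + (if pvBases.contains c then (1 : Int) else 0)]) acc
      = acc ++ pvScan s cs := by
  induction cs generalizing acc s with
  | nil => simp [pvScan]
  | cons c cs ih =>
    simp only [List.foldl_cons, pvScan, pvV]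
    rw [h, Option.getD_some]
    rw [ih (acc ++ [s + if pvBases.contains c then (1 : Int) else 0])
          (s + if pvBases.contains c then (1 : Int) else 0) List.getLast?_concat]
    simp

theorem pvScan_getD (s : Int) (cs : List Char) (k : Nat) (hk : k < cs.length) :
    (pvScan s cs).getD k 0 = s + ((cs.take (k + 1)).countP (pvBases.contains ·) : Int) := by
  induction cs generalizing s k with
  | nil => simp at hk
  | cons c cs ih =>
    cases k with
    | zero =>
      simp only [pvScan, pvV, List.getD_cons_zero, List.take_succ_cons, List.take_zero,
        List.countP_cons, List.countP_nil]
      split <;> simp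
    | succ k =>
      simp only [pvScan, List.getD_cons_succ]
      rw [ih (s + pvV c) k (by simpa using Nat.lt_of_succ_lt_succ hk)]
      simp [pvV, List.take_succ_cons, List.countP_cons]
      split <;> omega

theorem pvPre_getD (cs : List Char) (k : Nat) (hk : k ≤ cs.length) :
    ((0 : Int) :: pvScan 0 cs).getD k 0 = ((cs.take k).countP (pvBases.contains ·) : Int) := by
  cases k with
  | zero => simp
  | succ k =>
    simp only [List.getD_cons_succ]
    rw [pvScan_getD 0 cs k (by omega)]
    simp

-- the window A slices out, as drop/take
theorem pvSlice (cs : List Char) (i : Int) (h0 : 0 ≤ i) :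
    PySem.List.slice cs (some i) (some (i + 9)) = (cs.drop i.toNat).take 9 := by
  obtain ⟨k, rfl⟩ : ∃ k : Nat, i = (k : Int) := ⟨i.toNat, by omega⟩
  have h2 : (k : Int) + 9 = ((k + 9 : Nat) : Int) := by push_cast; ring
  rw [h2, PySem.List.slice_natCast]
  simp

theorem pvWindowLen (cs : List Char) (k : Nat) (h : k + 9 ≤ cs.length) :
    ((cs.drop k).take 9).length = 9 := by
  simp [List.length_take, List.length_drop]
  omega

-- validity predicates agree on in-range window starts
theorem pvPred (cs : List Char) (i : Int) (h0 : 0 ≤ i) (h9 : i.toNat + 9 ≤ cs.length) :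
    (PySem.List.pyGetD ((0 : Int) :: pvScan 0 cs) (i + 9) 0
       - PySem.List.pyGetD ((0 : Int) :: pvScan 0 cs) i 0 == 9)
      = !(((cs.drop i.toNat).take 9).any fun b => !(pvBases.contains b)) := by
  rw [PySem.List.pyGetD_of_nonneg _ _ (by omega), PySem.List.pyGetD_of_nonneg _ _ h0]
  have ht : (i + 9).toNat = i.toNat + 9 := by omega
  rw [ht, pvPre_getD cs (i.toNat + 9) h9, pvPre_getD cs i.toNat (by omega)]
  rw [List.take_add, List.countP_append]
  rw [← List.all_eq_not_any_not]
  set w := (cs.drop i.toNat).take 9 with hw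
  have hlen : w.length = 9 := pvWindowLen cs i.toNat h9
  have hd : ((((cs.take i.toNat).countP (pvBases.contains ·) + w.countP (pvBases.contains ·) : Nat) : Int)
      - ((cs.take i.toNat).countP (pvBases.contains ·) : Int)) = (w.countP (pvBases.contains ·) : Int) := by
    push_cast; ring
  rw [hd, Bool.eq_iff_iff, beq_iff_eq, List.all_eq_true]
  constructor
  · intro hb
    have h9' : w.countP (pvBases.contains ·) = w.length := by
      rw [hlen]; exact_mod_cast hb
    exact List.countP_eq_length.mp h9'
  · intro hall
    have h9' : w.countP (pvBases.contains ·) = w.length := List.countP_eq_length.mpr hall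
    rw [h9', hlen]; norm_num

-- window indexing: B's direct genome index equals indexing the window
theorem pvIdx (cs : List Char) (i : Int) (j : Nat) (h0 : 0 ≤ i) (hj : j < 9) :
    PySem.List.pyGetD cs (i + (j : Int)) ' ' = ((cs.drop i.toNat).take 9).getD j ' ' := by
  rw [PySem.List.pyGetD_of_nonneg _ _ (by omega)]
  have ht : (i + (j : Int)).toNat = i.toNat + j := by omega
  rw [ht]
  rw [List.getD_eq_getElem?_getD, List.getD_eq_getElem?_getD]
  rw [List.getElem?_take_of_lt hj, List.getElem?_drop]

-- positional scoring over a 9-window equals A's zip-with-motif scoring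
theorem pvNine (w : List Char) (h : w.length = 9) :
    ((PySem.List.pyRange 0 9).map (fun j =>
        if w.getD j.toNat ' ' == pvMotif.getD j.toNat ' ' then (1 : Int) else -1)).sum
      = score_window w := by
  match w, h with
  | [a, b, c, d, e, f, g, h', i'], _ => rfl

theorem pvScore (cs : List Char) (i : Int) (h0 : 0 ≤ i) (h9 : i.toNat + 9 ≤ cs.length) :
    ((PySem.List.pyRange 0 9).map (fun j =>
        if PySem.List.pyGetD cs (i + j) ' ' == PySem.List.pyGetD pvMotif j ' '
        then (1 : Int) else -1)).sum
      = score_window (PySem.List.slice cs (some i) (some (i + 9))) := by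
  rw [pvSlice cs i h0]
  rw [← pvNine _ (pvWindowLen cs i.toNat h9)]
  congr 1
  apply List.map_congr_left
  intro j hj
  obtain ⟨h0j, hlt⟩ := (PySem.List.mem_pyRange_one).1 hj
  obtain ⟨jn, rfl⟩ : ∃ k : Nat, j = (k : Int) := ⟨j.toNat, by omega⟩
  have hjlt : jn < 9 := by exact_mod_cast hlt
  rw [pvIdx cs i jn h0 hjlt]
  rw [PySem.List.pyGetD_of_nonneg _ _ (by positivity)]
  simp

theorem pv_key (cs : List Char) :
    scan_genome (String.ofList cs) = scan_genome_alt (String.ofList cs) := by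
  simp only [scan_genome, scan_genome_alt, String.toList_ofList]
  rw [pvFoldPre cs [(0 : Int)] 0 rfl]
  simp only [List.singleton_append]
  set r := PySem.List.pyRange 0 ((cs.length : Int) - 9 + 1) with hr
  rw [PySem.List.foldl_congr_mem r _
    (fun acc i =>
      ((if (!((PySem.List.slice cs (some i) (some (i + 9))).any fun b => !(pvBases.contains b))) then acc.1 ++ [i] else acc.1),
       (if (!((PySem.List.slice cs (some i) (some (i + 9))).any fun b => !(pvBases.contains b))) then acc.2 ++ [score_window (PySem.List.slice cs (some i) (some (i + 9)))] else acc.2)))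
    ([], [])
    (by
      intro acc i _
      cases hb : ((PySem.List.slice cs (some i) (some (i + 9))).any fun b => !(pvBases.contains b)) <;> simp only [hb, Bool.not_true, Bool.not_false, if_true] <;> simp)]
  rw [PySem.List.foldl_prod_mk
    (f := fun l i => if (!((PySem.List.slice cs (some i) (some (i + 9))).any fun b => !(pvBases.contains b))) then l ++ [i] else l)
    (g := fun l i => if (!((PySem.List.slice cs (some i) (some (i + 9))).any fun b => !(pvBases.contains b))) then l ++ [score_window (PySem.List.slice cs (some i) (some (i + 9)))] else l)]
  rw [PySem.List.foldl_append_if_eq_filter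
        (fun i => !((PySem.List.slice cs (some i) (some (i + 9))).any fun b => !(pvBases.contains b))) r []]
  rw [PySem.List.foldl_append_if
        (fun i => !((PySem.List.slice cs (some i) (some (i + 9))).any fun b => !(pvBases.contains b)))
        (fun i => score_window (PySem.List.slice cs (some i) (some (i + 9)))) r []]
  simp only [List.nil_append]
  have hbounds : ∀ i ∈ r, 0 ≤ i ∧ i.toNat + 9 ≤ cs.length := by
    intro i hi
    have := (PySem.List.mem_pyRange_one).1 hi
    omega
  have hfilt :
      r.filter (fun i => !((PySem.List.slice cs (some i) (some (i + 9))).any fun b => !(pvBases.contains b)))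
        = r.filter (fun i =>
            PySem.List.pyGetD ((0 : Int) :: pvScan 0 cs) (i + 9) 0
              - PySem.List.pyGetD ((0 : Int) :: pvScan 0 cs) i 0 == 9) := by
    apply List.filter_congr
    intro i hi
    obtain ⟨h0, h9⟩ := hbounds i hi
    rw [pvSlice cs i h0]
    exact (pvPred cs i h0 h9).symm
  rw [hfilt]
  congr 1
  apply List.map_congr_left
  intro i hi
  obtain ⟨h0, h9⟩ := hbounds i (List.mem_of_mem_filter hi)
  exact (pvScore cs i h0 h9).symm

-- ===== VERDICT (by name: the statement is the Claim_ definition above) =====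
theorem scan_genome_spec : Claim_equal_scan_genome := by
  intro seq _
  show scan_genome seq = scan_genome_alt seq
  have h : String.ofList seq.toList = seq := by simp
  rw [← h]
  exact pv_key seq.toList
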